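-- pv_equiv track=rewrite | github.com/Er-Simon/Sqlite3-restore-deleted-records | records_parser.py | bytes_to_varint
-- ===== SOURCE A (Python) =====
-- def bytes_to_varint(area):
--     length = len(area)
--     count = 0
--
--     temp = []
--     temp_length = 0
--     temp_value = 0
--
--     varints = []
--
--     while count != length:
--
--         if area[count] < 128:
--             if temp == []:
--                 varints.append((area[count], 1))
--             else:
--                 for x in range(temp_length):
--                     temp_value += (temp[x] - 128) * (128**(temp_length-x))
--
--                 temp_value += area[count]
--                 varints.append((temp_value, temp_length+1))
--
--                 temp = []
--                 temp_length = 0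
--                 temp_value = 0
--
--         else:
--             temp.append(area[count])
--             temp_length += 1
--
--         count+=1
--
--     return varints
-- ===== SOURCE B (Python) =====
-- def bytes_to_varint(area):
--     varints = []
--     start = 0
--     for i, b in enumerate(area):
--         if b < 128:
--             if i > start:
--                 value = 0
--                 for c in area[start:i]:
--                     value = value * 128 + (c - 128)
--                 varints.append((value * 128 + b, i - start + 1))
--             else:
--                 varints.append((b, 1))
--             start = i + 1
--     return varints
-- ===== Notes on version B (the rewrite author's own statement) =====
-- stated objective: alternative
-- what changed: B drops A's buffered continuation-byte list and inner 128**k power loop: it scans for terminator bytes and Horner-folds each terminated run taken as a slice (value = value*128 + (c-128)), doing no work on an unterminated trailing run.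
import Mathlib
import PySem

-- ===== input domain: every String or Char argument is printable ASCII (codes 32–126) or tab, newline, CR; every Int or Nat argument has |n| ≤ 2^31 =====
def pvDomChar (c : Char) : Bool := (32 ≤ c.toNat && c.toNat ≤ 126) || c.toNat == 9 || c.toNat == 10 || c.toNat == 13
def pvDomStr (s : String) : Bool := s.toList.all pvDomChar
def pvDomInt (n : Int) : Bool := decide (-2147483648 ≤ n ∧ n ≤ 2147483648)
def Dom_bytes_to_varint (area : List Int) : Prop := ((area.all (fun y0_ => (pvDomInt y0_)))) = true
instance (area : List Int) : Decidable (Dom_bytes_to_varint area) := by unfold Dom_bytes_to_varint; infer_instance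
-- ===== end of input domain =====

-- B scans for terminator bytes and Horner-folds each terminated run taken as a slice,
-- instead of A's buffered continuation list with an inner 128**k power loop; objective: alternative.

-- ===== PORT A =====
-- A's while loop over count, with state temp/temp_length/temp_value/varints; the inner
-- `for x in range(temp_length)` is the foldl over List.range. temp_length always equals
-- temp.length, so temp.getD x 0 is exactly Python's temp[x] here (x < temp_length).
def pvALoop : List Int → List Int → Nat → Int → List (Int × Int) → List (Int × Int)
  | [], _, _, _, varints => varints
  | b :: rest, temp, tl, tv, varints =>
    if b < 128 then
      if temp = [] then
        pvALoop rest temp tl tv (varints ++ [(b, 1)])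
      else
        let tv1 := (List.range tl).foldl
          (fun acc x => acc + (temp.getD x 0 - 128) * (128 : Int) ^ (tl - x)) tv
        let tv2 := tv1 + b
        pvALoop rest [] 0 0 (varints ++ [(tv2, (tl : Int) + 1)])
    else
      pvALoop rest (temp ++ [b]) (tl + 1) tv varints

def bytes_to_varint (area : List Int) : List (Int × Int) :=
  pvALoop area [] 0 0 []

-- ===== PORT B =====
-- B's `for i, b in enumerate(area)` with the run start index; area[start:i] is PySem slice.
def pvBGo (area : List Int) : List (Int × Int) → Int → List (Int × Int) → List (Int × Int)
  | [], _, varints => varints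
  | (i, b) :: rest, start, varints =>
    if b < 128 then
      if start < i then
        let value := (PySem.List.slice area (some start) (some i)).foldl
          (fun v c => v * 128 + (c - 128)) 0
        pvBGo area rest (i + 1) (varints ++ [(value * 128 + b, i - start + 1)])
      else
        pvBGo area rest (i + 1) (varints ++ [(b, 1)])
    else
      pvBGo area rest start varints

def bytes_to_varint_alt (area : List Int) : List (Int × Int) :=
  pvBGo area (PySem.List.enumerate area 0) 0 []

-- ===== PRECONDITION & SPEC =====
def Spec_bytes_to_varint (area : List Int) (out : List (Int × Int)) : Prop := out = bytes_to_varint_alt area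
instance (area : List Int) (out : List (Int × Int)) : Decidable (Spec_bytes_to_varint area out) := by unfold Spec_bytes_to_varint; infer_instance

-- ===== CLAIM (what is proved, stated in full; the proofs are below) =====
def Claim_equal_bytes_to_varint : Prop := ∀ (area : List Int), Dom_bytes_to_varint area → Spec_bytes_to_varint area (bytes_to_varint area)

-- ===== LEMMAS AND PROOFS =====

-- Horner value over a buffer of continuation bytes.
def pvHorner (temp : List Int) : Int :=
  temp.foldl (fun v b => v * 128 + (b - 128)) 0

lemma pvHorner_append (temp : List Int) (c : Int) :
    pvHorner (temp ++ [c]) = pvHorner temp * 128 + (c - 128) := by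
  simp [pvHorner]

lemma foldl_add_sum (l : List Nat) (f : Nat → Int) (a : Int) :
    l.foldl (fun acc x => acc + f x) a = a + (l.map f).sum := by
  induction l generalizing a with
  | nil => simp
  | cons x xs ih => simp [List.foldl_cons, ih]; ring

-- A's inner power loop (started from 0) equals 128 * Horner value.
lemma pvSum_eq_horner (temp : List Int) :
    (List.range temp.length).foldl
      (fun acc x => acc + (temp.getD x 0 - 128) * (128 : Int) ^ (temp.length - x)) 0
    = pvHorner temp * 128 := by
  induction temp using List.reverseRecOn with
  | nil => simp [pvHorner]
  | append_singleton l c ih =>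
    rw [foldl_add_sum] at ih ⊢
    simp only [List.length_append, List.length_singleton]
    rw [List.range_succ, List.map_append, List.sum_append]
    have hmap : (List.range l.length).map
        (fun x => ((l ++ [c]).getD x 0 - 128) * (128 : Int) ^ (l.length + 1 - x))
        = (List.range l.length).map
        (fun x => ((l.getD x 0 - 128) * (128 : Int) ^ (l.length - x)) * 128) := by
      apply List.map_congr_left
      intro x hx
      rw [List.mem_range] at hx
      rw [List.getD_append _ _ _ _ hx]
      have : l.length + 1 - x = (l.length - x) + 1 := by omega
      rw [this, pow_succ]
      ring
    rw [hmap, List.sum_map_mul_right]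
    have hlast : (l ++ [c]).getD l.length 0 = c := by simp
    rw [pvHorner_append]
    simp only [List.map_cons, List.map_nil, List.sum_cons, List.sum_nil, hlast]
    have hs : ((List.range l.length).map
        (fun x => (l.getD x 0 - 128) * (128 : Int) ^ (l.length - x))).sum
        = pvHorner l * 128 := by omega
    rw [hs]
    have : l.length + 1 - l.length = 1 := by omega
    rw [this]
    ring

-- The central correspondence: while scanning the suffix `rest = area.drop i`, A's buffer
-- is exactly the slice area[start:i] and B carries only the index `start`.
lemma pvAB (area : List Int) : ∀ (rest : List Int) (i start : Nat)
    (varints : List (Int × Int)), start ≤ i → rest = area.drop i →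
    pvALoop rest ((area.drop start).take (i - start)) (i - start) 0 varints
      = pvBGo area (PySem.List.enumerate rest (i : Int)) (start : Int) varints := by
  intro rest
  induction rest with
  | nil => intro i start varints _ _; simp [pvALoop, PySem.List.enumerate_nil, pvBGo]
  | cons b rest' ih =>
    intro i start varints hsi hdrop
    have hilen : i < area.length := by
      by_contra h
      have : area.drop i = [] := List.drop_eq_nil_of_le (by omega)
      simp [this] at hdrop
    have hrest' : rest' = area.drop (i + 1) := by
      have := congrArg List.tail hdrop
      simpa [List.tail_drop] using this
    have hbi : area[i]? = some b := by
      have h := congrArg (fun l : List Int => l[0]?) hdrop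
      simp only [List.getElem?_cons_zero, List.getElem?_drop, Nat.add_zero] at h
      exact h.symm
    have htl : ((area.drop start).take (i - start)).length = i - start := by
      simp [List.length_take, List.length_drop]; omega
    rw [PySem.List.enumerate_cons]
    by_cases hb : b < 128
    · by_cases hse : start = i
      · subst hse
        have h0 : start - start = 0 := by omega
        simp only [pvALoop, pvBGo, if_pos hb, h0, List.take_zero,
          lt_self_iff_false, if_false]
        have := ih (start + 1) (start + 1) (varints ++ [(b, 1)]) (le_refl _) hrest'
        simpa [Nat.sub_self] using this
      · have hlt : start < i := by omega
        have hne : (area.drop start).take (i - start) ≠ [] := by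
          intro h
          have := congrArg List.length h
          rw [htl] at this
          simp at this
          omega
        have hltI : (start : Int) < (i : Int) := by exact_mod_cast hlt
        simp only [pvALoop, pvBGo, if_pos hb, if_neg hne, if_pos hltI]
        rw [show (i : Int) - start + 1 = ((i - start : Nat) : Int) + 1 by push_cast [Nat.cast_sub hsi]; ring]
        rw [PySem.List.slice_natCast]
        have hsum : (List.range (i - start)).foldl
            (fun acc x => acc + (((area.drop start).take (i - start)).getD x 0 - 128)
              * (128 : Int) ^ ((i - start) - x)) 0
            = pvHorner ((area.drop start).take (i - start)) * 128 := by
          have := pvSum_eq_horner ((area.drop start).take (i - start))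
          rw [htl] at this
          exact this
        rw [hsum]
        have hval : ((area.drop start).take (i - start)).foldl
            (fun v c => v * 128 + (c - 128)) 0 = pvHorner ((area.drop start).take (i - start)) := rfl
        rw [hval]
        have := ih (i + 1) (i + 1) (varints ++
          [(pvHorner ((area.drop start).take (i - start)) * 128 + b, ((i - start : Nat) : Int) + 1)])
          (le_refl _) hrest'
        simpa [Nat.sub_self, zero_add] using this
    · simp only [pvALoop, pvBGo, if_neg hb]
      have hstep : (area.drop start).take (i + 1 - start)
          = (area.drop start).take (i - start) ++ [b] := by
        have h1 : i + 1 - start = (i - start) + 1 := by omega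
        rw [h1, List.take_add_one]
        rw [List.getElem?_drop, show start + (i - start) = i by omega, hbi]
        rfl
      have := ih (i + 1) start varints (by omega) hrest'
      rw [hstep] at this
      have h3 : i + 1 - start = (i - start) + 1 := by omega
      rw [h3] at this
      exact this

-- ===== VERDICT (by name: the statement is the Claim_ definition above) =====
theorem bytes_to_varint_spec : Claim_equal_bytes_to_varint := by
  intro area _
  unfold Spec_bytes_to_varint bytes_to_varint bytes_to_varint_alt
  simpa using pvAB area area 0 0 [] (le_refl 0) rfl
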